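-- pv_equiv track=rewrite | github.com/jlice/data-mining-assignment | matrix.py | sum_axis
-- ===== SOURCE A (Python) =====
-- def shape(x):
--     """计算多维数组的形状
--
--     Args:
--         x: 数组
--
--     Returns: 数组的形状
--
--     Examples:
--         >>> shape(1)
--         ()
--         >>> shape([1, 2])
--         (2,)
--         >>> shape([[1, 1], [2, 2], [3, 3]])
--         (3, 2)
--         >>> shape([[[1, 2, 3], [4, 5, 6]]])
--         (1, 2, 3)
--
--     """
--     if isinstance(x, (list, tuple)):
--         value = []
--         tmp = x
--         while isinstance(tmp, (list, tuple)):
--             value.append(len(tmp))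
--             tmp = tmp[0]
--         return tuple(value)
--     else:
--         return tuple()
--
-- def sum_axis(x, axis=0):
--     """对矩阵某个轴进行求和
--
--     Args:
--         x: 矩阵
--         axis: 轴序号
--
--     Returns: 求和的结果
--
--     Examples:
--         >>> sum_axis([[1, 2, 3], [3, 4, 5]], axis=0)
--         [4, 6, 8]
--         >>> sum_axis([[1, 2, 3], [3, 4, 5]], axis=1)
--         [6, 12]
--
--     """
--     if len(shape(x)) == 2:
--         m, n = shape(x)
--         if axis == 0:
--             result = [None] * n
--             for i in range(n):
--                 result[i] = sum([xi[i] for xi in x])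
--             return result
--         elif axis == 1:
--             result = [None] * m
--             for i in range(m):
--                 result[i] = sum([xi for xi in x[i]])
--             return result
--     else:
--         raise ValueError("输入错误：期望是一个矩阵")
-- ===== SOURCE B (Python) =====
-- def sum_axis(x, axis=0):
--     if axis == 0:
--         # single row-major pass maintaining running column sums
--         result = [0] * len(x[0])
--         for row in x:
--             result = [result[i] + row[i] for i in range(len(result))]
--         return result
--     if axis == 1:
--         return [sum(row) for row in x]
--     return None
-- ===== Notes on version B (the rewrite author's own statement) =====
-- stated objective: alternative
-- what changed: axis=0 is computed in one row-major pass that updates a vector of running column sums, instead of A's per-column scans over all rows; axis=1 becomes a per-row sum comprehension and the shape() helper is dropped.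
import Mathlib
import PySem

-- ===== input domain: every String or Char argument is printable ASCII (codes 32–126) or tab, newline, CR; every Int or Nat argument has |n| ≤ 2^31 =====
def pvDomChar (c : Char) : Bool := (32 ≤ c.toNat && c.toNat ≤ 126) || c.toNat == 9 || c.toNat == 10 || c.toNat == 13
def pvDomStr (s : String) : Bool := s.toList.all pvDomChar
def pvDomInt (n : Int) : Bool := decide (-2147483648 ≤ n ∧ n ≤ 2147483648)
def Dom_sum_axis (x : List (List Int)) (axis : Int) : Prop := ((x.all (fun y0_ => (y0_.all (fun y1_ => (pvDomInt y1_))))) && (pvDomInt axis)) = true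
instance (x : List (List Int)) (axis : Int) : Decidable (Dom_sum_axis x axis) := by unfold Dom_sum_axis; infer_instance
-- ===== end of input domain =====

-- One honest line: B replaces A's per-column scans (axis=0) by a single row-major pass over
-- running column sums and A's index loop over rows (axis=1) by a per-row sum map; return-value
-- equivalence only (neither mutates its argument observably).

-- ===== PORT A =====
-- shape(x) on a List (List Int) matrix: (len x, len x[0]); `none` where the Python while-loop
-- hits tmp[0] on an empty list (IndexError).
def shapeA (x : List (List Int)) : Option (Int × Int) :=
  match x with
  | [] => none
  | r0 :: _ => if r0 = [] then none else some ((x.length : Int), (r0.length : Int))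

def sum_axis (x : List (List Int)) (axis : Int) : Option (List Int) :=
  match shapeA x with
  | none => none      -- shape(x) raises before the len(shape)==2 test
  | some (m, n) =>
    if axis = 0 then
      -- for i in range(n): result[i] = sum([xi[i] for xi in x])
      (PySem.List.pyRange 0 n 1).mapM (fun i =>
        (x.mapM (fun xi => PySem.List.pyGet? xi i)).map List.sum)
    else if axis = 1 then
      -- for i in range(m): result[i] = sum([xi for xi in x[i]])
      (PySem.List.pyRange 0 m 1).mapM (fun i =>
        (PySem.List.pyGet? x i).map (fun xi => xi.sum))
    else none          -- Python falls off the end: returns None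

-- ===== PORT B =====
def sum_axis_alt (x : List (List Int)) (axis : Int) : Option (List Int) :=
  if axis = 0 then
    match x with
    | [] => none       -- len(x[0]) raises
    | r0 :: _ =>
      -- result = [0]*n; for row in x: result = [result[i] + row[i] for i in range(len(result))]
      x.foldlM (fun res row =>
          (List.range res.length).mapM (fun (i : Nat) =>
            (PySem.List.pyGet? row (i : Int)).map (fun v => res.getD i 0 + v)))
        (List.replicate r0.length 0)
  else if axis = 1 then
    some (x.map (fun row => row.sum))
  else none

-- ===== PRECONDITION & SPEC =====
-- Pre_ excludes exactly the inputs where Python A raises: an empty matrix or an empty first row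
-- (IndexError inside shape), and, for axis=0, a row shorter than the first row (IndexError on xi[i]).
def Pre_sum_axis (x : List (List Int)) (axis : Int) : Prop :=
  x ≠ [] ∧ x.headD [] ≠ [] ∧ (axis = 0 → ∀ r ∈ x, (x.headD []).length ≤ r.length)
instance (x : List (List Int)) (axis : Int) : Decidable (Pre_sum_axis x axis) := by
  unfold Pre_sum_axis; infer_instance

def pvWitness_sum_axis : List (List Int) × Int := ([[1, 2, 3], [3, 4, 5]], 0)

def Spec_sum_axis (x : List (List Int)) (axis : Int) (out : Option (List Int)) : Prop := out = sum_axis_alt x axis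
instance (x : List (List Int)) (axis : Int) (out : Option (List Int)) : Decidable (Spec_sum_axis x axis out) := by unfold Spec_sum_axis; infer_instance

-- ===== CLAIM (what is proved, stated in full; the proofs are below) =====
def Claim_equal_sum_axis : Prop := ∀ (x : List (List Int)) (axis : Int), Dom_sum_axis x axis → Pre_sum_axis x axis → Spec_sum_axis x axis (sum_axis x axis)

-- ===== LEMMAS AND PROOFS =====

-- mapM over Option succeeds pointwise
theorem mapM_eq_map_of_forall {α β : Type} {f : α → Option β} {g : α → β}
    (l : List α) (h : ∀ a ∈ l, f a = some (g a)) : l.mapM f = some (l.map g) := by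
  induction l with
  | nil => rfl
  | cons a t ih =>
    simp only [List.mapM_cons, h a (by simp), ih (fun b hb => h b (by simp [hb])),
      Option.bind_eq_bind, Option.bind_some, List.map_cons]
    rfl

-- A's axis=1 loop: indexing every position of x in order is just mapping over x
theorem mapM_pyGet_aux {α β : Type} (f : α → β) :
    ∀ (t pre : List α),
      (PySem.List.pyRange (pre.length : Int) ((pre.length : Int) + t.length) 1).mapM
        (fun i => (PySem.List.pyGet? (pre ++ t) i).map f) = some (t.map f) := by
  intro t
  induction t with
  | nil => intro pre; simp [PySem.List.pyRange_one_eq_nil]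
  | cons a t ih =>
    intro pre
    rw [PySem.List.pyRange_one_cons (by simp only [List.length_cons]; push_cast; omega)]
    have h1 : PySem.List.pyGet? (pre ++ a :: t) (pre.length : Int) = some a :=
      PySem.List.pyGet?_append_length pre t a
    have h2 := ih (pre ++ [a])
    simp only [List.append_assoc, List.singleton_append, List.length_append,
      List.length_singleton] at h2
    rw [List.mapM_cons, h1]
    simp only [List.length_cons]
    push_cast at h2 ⊢
    rw [show (pre.length : Int) + ((t.length : Int) + 1) = (pre.length : Int) + 1 + t.length by ring]
    simp [h2]

theorem mapM_pyGet_map {α β : Type} (x : List α) (f : α → β) :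
    (PySem.List.pyRange 0 (x.length : Int) 1).mapM
      (fun i => (PySem.List.pyGet? x i).map f) = some (x.map f) := by
  have := mapM_pyGet_aux f x []
  simpa using this

-- the pure accumulator step of B's axis=0 loop
def bStep (res row : List Int) : List Int :=
  (List.range res.length).map (fun i => res.getD i 0 + row.getD i 0)

theorem bStep_length (res row : List Int) : (bStep res row).length = res.length := by
  simp [bStep]

theorem inner_mapM_eq (res row : List Int) (h : res.length ≤ row.length) :
    (List.range res.length).mapM (fun (i : Nat) =>
        (PySem.List.pyGet? row (i : Int)).map (fun v => res.getD i 0 + v))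
      = some (bStep res row) := by
  unfold bStep
  apply mapM_eq_map_of_forall
  intro i hi
  have hi' : i < res.length := List.mem_range.mp hi
  rw [PySem.List.pyGet?_ofNat row i (by omega)]
  simp [List.getD_eq_getElem?_getD, List.getElem?_eq_getElem (show i < row.length by omega)]

theorem foldlM_eq_foldl (n : Nat) :
    ∀ (l : List (List Int)) (res : List Int), res.length = n → (∀ r ∈ l, n ≤ r.length) →
      l.foldlM (fun res row =>
          (List.range res.length).mapM (fun (i : Nat) =>
            (PySem.List.pyGet? row (i : Int)).map (fun v => res.getD i 0 + v))) res
        = some (l.foldl bStep res) := by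
  intro l
  induction l with
  | nil => intro res _ _; rfl
  | cons r t ih =>
    intro res hlen hall
    rw [List.foldlM_cons, inner_mapM_eq res r (by rw [hlen]; exact hall r (by simp))]
    rw [Option.bind_eq_bind, Option.bind_some]
    exact ih (bStep res r) (by rw [bStep_length, hlen]) (fun s hs => hall s (by simp [hs]))

-- helper: map getD over range of the length is the identity
theorem map_getD_range_eq_self {α : Type} (l : List α) (d : α) :
    (List.range l.length).map (fun k => l.getD k d) = l := by
  apply List.ext_getElem (by simp)
  intro i h1 h2
  simp [List.getD_eq_getElem?_getD, List.getElem?_eq_getElem h2]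

-- column-sum characterisation of the row-major accumulator
theorem foldl_bStep_eq (n : Nat) :
    ∀ (l : List (List Int)) (res : List Int), res.length = n → (∀ r ∈ l, n ≤ r.length) →
      l.foldl bStep res
        = (List.range n).map (fun k => res.getD k 0 + (l.map (fun r => r.getD k 0)).sum) := by
  intro l
  induction l with
  | nil =>
    intro res hlen _
    subst hlen
    simp only [List.foldl_nil, List.map_nil, List.sum_nil, Int.add_zero]
    exact (map_getD_range_eq_self res 0).symm
  | cons r t ih =>
    intro res hlen hall
    rw [List.foldl_cons, ih (bStep res r) (by rw [bStep_length, hlen])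
      (fun s hs => hall s (by simp [hs]))]
    apply List.map_congr_left
    intro k hk
    have hk' : k < n := List.mem_range.mp hk
    have : (bStep res r).getD k 0 = res.getD k 0 + r.getD k 0 := by
      unfold bStep
      rw [List.getD_eq_getElem?_getD,
        List.getElem?_eq_getElem (by simpa [hlen] using hk')]
      simp
    rw [this]
    simp [Int.add_assoc]

-- A's axis=0 loop computes the same column sums
theorem a_axis0_eq (x : List (List Int)) (n : Nat) (hall : ∀ r ∈ x, n ≤ r.length) :
    (PySem.List.pyRange 0 (n : Int) 1).mapM (fun i =>
        (x.mapM (fun xi => PySem.List.pyGet? xi i)).map List.sum)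
      = some ((List.range n).map (fun k => (x.map (fun r => r.getD k 0)).sum)) := by
  rw [PySem.List.pyRange_zero_nat]
  rw [List.mapM_map]
  apply mapM_eq_map_of_forall
  intro k hk
  have hk' : k < n := List.mem_range.mp hk
  have hinner : x.mapM (fun xi => PySem.List.pyGet? xi (k : Int))
      = some (x.map (fun r => r.getD k 0)) := by
    apply mapM_eq_map_of_forall
    intro r hr
    have hkr : k < r.length := by have := hall r hr; omega
    rw [PySem.List.pyGet?_ofNat r k hkr]
    simp [List.getD_eq_getElem?_getD, List.getElem?_eq_getElem hkr]
  simp only [Function.comp_apply]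
  rw [hinner]
  rfl

-- ===== VERDICT (by name: the statement is the Claim_ definition above) =====
theorem sum_axis_spec : Claim_equal_sum_axis := by
  intro x axis _ hpre
  obtain ⟨hx, hh, hrag⟩ := hpre
  obtain ⟨r0, t, rfl⟩ : ∃ r0 t, x = r0 :: t := by
    cases x with
    | nil => exact absurd rfl hx
    | cons a b => exact ⟨a, b, rfl⟩
  simp only [List.headD_cons] at hh hrag
  unfold Spec_sum_axis
  by_cases h0 : axis = 0
  · subst h0
    simp only [sum_axis, sum_axis_alt, shapeA, if_neg hh]
    rw [a_axis0_eq (r0 :: t) r0.length (hrag rfl),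
      foldlM_eq_foldl r0.length (r0 :: t) (List.replicate r0.length 0) (by simp) (hrag rfl),
      foldl_bStep_eq r0.length (r0 :: t) (List.replicate r0.length 0) (by simp) (hrag rfl)]
    refine congrArg some (List.map_congr_left ?_)
    intro k hk
    rw [List.getD_replicate 0 (List.mem_range.mp hk)]
    ring
  · by_cases h1 : axis = 1
    · subst h1
      simp only [sum_axis, sum_axis_alt, shapeA, if_neg hh, if_neg h0]
      exact (mapM_pyGet_map (r0 :: t) (fun xi => xi.sum)).symm ▸ rfl
    · simp only [sum_axis, sum_axis_alt, shapeA, if_neg hh, if_neg h0, if_neg h1]
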